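-- pv_equiv track=rewrite | github.com/YuryTarasevichA/SeminarPyhton | task11.py | if_fibonacci_num
-- ===== SOURCE A (Python) =====
-- def if_fibonacci_num(a):
--     if a <= 1:
--         return -1
--     f1 = 1
--     fnext = 1
--     fnew = 0
--     count = 4
--     while fnew <= a:
--         fnew = f1 + fnext
--         if fnew == a:
--             return count
--         if fnew > a:
--             return -1
--         f1 = fnext
--         fnext = fnew
--         count += 1
-- ===== SOURCE B (Python) =====
-- def _fd(k):
--     # fast doubling: (F(k), F(k+1)) for k >= 0
--     if k == 0:
--         return (0, 1)
--     x, y = _fd(k >> 1)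
--     c = x * (2 * y - x)
--     d = x * x + y * y
--     if k & 1:
--         return (d, c + d)
--     return (c, d)
--
--
-- def _fib(n):
--     return _fd(n)[0]
--
--
-- def if_fibonacci_num(a):
--     # Fast-doubling Fibonacci + exponential/binary search on the index,
--     # instead of linearly generating every Fibonacci number up to a.
--     if a <= 1:
--         return -1
--     hi = 4
--     while _fib(hi) < a:
--         hi *= 2
--     lo = 3
--     while lo < hi:
--         mid = (lo + hi) // 2
--         if _fib(mid) < a:
--             lo = mid + 1
--         else:
--             hi = mid
--     return lo + 1 if _fib(lo) == a else -1
-- ===== Notes on version B (the rewrite author's own statement) =====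
-- stated objective: alternative
-- what changed: Instead of linearly generating every Fibonacci number up to a and testing inline, B computes Fibonacci numbers on demand by recursive fast doubling and locates the index by exponential growth followed by binary search over the index, then one final equality check.
import Mathlib
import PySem

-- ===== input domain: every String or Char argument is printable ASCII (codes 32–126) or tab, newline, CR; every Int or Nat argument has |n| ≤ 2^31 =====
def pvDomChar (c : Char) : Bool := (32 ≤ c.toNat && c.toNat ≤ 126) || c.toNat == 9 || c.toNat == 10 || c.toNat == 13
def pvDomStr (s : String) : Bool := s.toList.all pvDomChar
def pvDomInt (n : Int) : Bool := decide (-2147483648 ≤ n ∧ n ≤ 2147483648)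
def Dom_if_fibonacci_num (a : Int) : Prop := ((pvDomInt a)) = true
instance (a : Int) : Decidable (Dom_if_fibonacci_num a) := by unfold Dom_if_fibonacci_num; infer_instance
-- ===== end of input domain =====

-- B replaces A's linear generate-and-test scan by fast-doubling Fibonacci
-- evaluation plus exponential growth and binary search on the index
-- (objective: alternative algorithm; no measured speed claim).

-- ===== PORT A =====
-- A's while loop: fnew = f1+fnext; return count if fnew == a; return -1 if fnew > a;
-- else shift and continue.  Fuel a.toNat is a totality bound only (the candidate
-- strictly increases each step, so the loop returns long before the fuel runs out).
def pvLoopA (a : Int) : Nat → Int → Int → Int → Int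
  | 0, _, _, _ => -1
  | fuel + 1, f1, fnext, count =>
    let fnew := f1 + fnext
    if fnew = a then count
    else if a < fnew then -1
    else pvLoopA a fuel fnext fnew (count + 1)

def if_fibonacci_num (a : Int) : Int :=
  if a ≤ 1 then -1 else pvLoopA a a.toNat 1 1 4

-- ===== PORT B =====
-- Source B's _fd (fast doubling): every call site passes a nonnegative int, so the
-- argument is taken as Nat (k >> 1 = k / 2 and k & 1 = k % 2 on nonneg ints; exact there).
def pvFD : Nat → Int × Int
  | 0 => (0, 1)
  | k + 1 =>
    let p := pvFD ((k + 1) / 2)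
    let x := p.1
    let y := p.2
    let c := x * (2 * y - x)
    let d := x * x + y * y
    if (k + 1) % 2 = 1 then (d, c + d) else (c, d)
decreasing_by exact Nat.div_lt_self (Nat.succ_pos k) (by norm_num)

-- Source B's _fib; its argument is nonnegative at every call site (hi, mid, lo ≥ 3).
def pvFib (n : Int) : Int := (pvFD n.toNat).1

-- Source B's exponential-growth loop: while _fib(hi) < a: hi *= 2.
-- Fuel a.toNat is a totality bound only (the loop stops far earlier).
def pvGrow (a : Int) : Nat → Int → Int
  | 0, hi => hi
  | fuel + 1, hi => if pvFib hi < a then pvGrow a fuel (hi * 2) else hi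

-- Source B's binary-search loop: while lo < hi: mid = (lo+hi)//2; ...
def pvBis (a lo hi : Int) : Int :=
  if h : lo < hi then
    let mid := PySem.Int.floordiv (lo + hi) 2
    if pvFib mid < a then pvBis a (mid + 1) hi else pvBis a lo mid
  else lo
termination_by (hi - lo).toNat
decreasing_by
  · have hm : PySem.Int.floordiv (lo + hi) 2 = (lo + hi) / 2 :=
      PySem.Int.floordiv_eq_ediv_of_pos (by norm_num)
    simp only [hm] at *; omega
  · have hm : PySem.Int.floordiv (lo + hi) 2 = (lo + hi) / 2 :=
      PySem.Int.floordiv_eq_ediv_of_pos (by norm_num)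
    simp only [hm] at *; omega

def if_fibonacci_num_alt (a : Int) : Int :=
  if a ≤ 1 then -1
  else
    let hi := pvGrow a a.toNat 4
    let lo := pvBis a 3 hi
    if pvFib lo = a then lo + 1 else -1

-- ===== PRECONDITION & SPEC =====
def Spec_if_fibonacci_num (a : Int) (out : Int) : Prop := out = if_fibonacci_num_alt a
instance (a : Int) (out : Int) : Decidable (Spec_if_fibonacci_num a out) := by unfold Spec_if_fibonacci_num; infer_instance

-- ===== CLAIM (what is proved, stated in full; the proofs are below) =====
def Claim_equal_if_fibonacci_num : Prop := ∀ (a : Int), Dom_if_fibonacci_num a → Spec_if_fibonacci_num a (if_fibonacci_num a)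

-- ===== LEMMAS AND PROOFS =====

-- fast doubling computes Fibonacci pairs
lemma pvFD_eq : ∀ k : Nat, pvFD k = ((Nat.fib k : Int), (Nat.fib (k + 1) : Int)) := by
  intro k
  induction k using Nat.strong_induction_on with
  | _ k ih =>
    match k with
    | 0 => simp [pvFD]
    | k + 1 =>
      rw [pvFD]
      have hlt : (k + 1) / 2 < k + 1 := Nat.div_lt_self (Nat.succ_pos k) (by norm_num)
      rw [ih _ hlt]
      set m := (k + 1) / 2 with hm
      have hfm : Nat.fib m ≤ 2 * Nat.fib (m + 1) := by
        have h := Nat.fib_mono (Nat.le_succ m)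
        simp only [Nat.succ_eq_add_one] at h
        omega
      have hc : (Nat.fib m : Int) * (2 * (Nat.fib (m + 1) : Int) - (Nat.fib m : Int))
          = ((Nat.fib (2 * m) : Int)) := by
        rw [Nat.fib_two_mul]; push_cast [hfm]; ring
      have hd : (Nat.fib m : Int) * (Nat.fib m) + (Nat.fib (m + 1) : Int) * (Nat.fib (m + 1))
          = ((Nat.fib (2 * m + 1) : Int)) := by
        rw [Nat.fib_two_mul_add_one]; push_cast; ring
      have hsum : (Nat.fib (2 * m) : Int) + (Nat.fib (2 * m + 1) : Int)
          = (Nat.fib (2 * m + 1 + 1) : Int) := by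
        rw [Nat.fib_add_two]; push_cast; ring
      by_cases hpar : (k + 1) % 2 = 1
      · have h2m : k + 1 = 2 * m + 1 := by omega
        simp only [h2m]
        rw [if_pos (by omega : (2 * m + 1) % 2 = 1), Prod.mk.injEq]
        constructor
        · linarith [hd]
        · linarith [hc, hd, hsum]
      · have h2m : k + 1 = 2 * m := by omega
        simp only [h2m]
        rw [if_neg (by omega : ¬ 2 * m % 2 = 1), Prod.mk.injEq]
        constructor
        · linarith [hc]
        · linarith [hd]

lemma pvFib_eq (n : Int) : pvFib n = (Nat.fib n.toNat : Int) := by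
  unfold pvFib; rw [pvFD_eq]

-- fib lower bound: n + 1 ≤ fib (n + 2)
lemma fib_lb : ∀ n : Nat, n + 1 ≤ Nat.fib (n + 2) := by
  intro n
  induction n with
  | zero => simp
  | succ m ih =>
    have h1 : 1 ≤ Nat.fib (m + 1) := Nat.fib_pos.mpr (Nat.succ_pos m)
    have h2 := Nat.fib_add_two (n := m + 1)
    rw [show m + 1 + 1 = m + 2 by omega] at h2
    omega

lemma fib_lb' (m : Nat) (h : 2 ≤ m) : m - 1 ≤ Nat.fib m := by
  obtain ⟨k, rfl⟩ : ∃ k, m = k + 2 := ⟨m - 2, by omega⟩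
  have := fib_lb k; omega

-- fib strictly monotone from index 2
lemma fib_strict (m n : Nat) (h2 : 2 ≤ m) (h : m < n) : Nat.fib m < Nat.fib n := by
  have h1 : Nat.fib m < Nat.fib (m + 1) := Nat.fib_lt_fib_succ h2
  have h2' : Nat.fib (m + 1) ≤ Nat.fib n := Nat.fib_mono h
  omega

-- exponential search: the returned hi satisfies 4 ≤ hi and a ≤ pvFib hi
lemma grow_ok (a : Int) : ∀ (fuel : Nat) (hi : Int), 4 ≤ hi → a + 1 ≤ hi + fuel →
    4 ≤ pvGrow a fuel hi ∧ a ≤ pvFib (pvGrow a fuel hi) := by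
  intro fuel
  induction fuel with
  | zero =>
    intro hi h4 hle
    simp only [pvGrow]
    refine ⟨h4, ?_⟩
    rw [pvFib_eq]
    have h2 : 2 ≤ hi.toNat := by omega
    have := fib_lb' hi.toNat h2
    omega
  | succ n ih =>
    intro hi h4 hle
    rw [pvGrow]
    by_cases hlt : pvFib hi < a
    · rw [if_pos hlt]
      exact ih (hi * 2) (by omega) (by omega)
    · rw [if_neg hlt]
      exact ⟨h4, by omega⟩

-- binary search: from an invariant-satisfying interval, the returned lo is the least
-- index ≥ 3 with a ≤ fib lo
lemma bis_ok (a : Int) : ∀ (lo hi : Int), 3 ≤ lo → lo ≤ hi → a ≤ pvFib hi →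
    (∀ m : Int, 3 ≤ m → m < lo → pvFib m < a) →
    3 ≤ pvBis a lo hi ∧ pvBis a lo hi ≤ hi ∧ a ≤ pvFib (pvBis a lo hi) ∧
      (∀ m : Int, 3 ≤ m → m < pvBis a lo hi → pvFib m < a) := by
  intro lo hi
  induction lo, hi using pvBis.induct a with
  | case1 lo hi h mid hfl ih =>
    intro h3 hle hhi hinv
    have hm : mid = (lo + hi) / 2 := PySem.Int.floordiv_eq_ediv_of_pos (by norm_num)
    rw [pvBis, dif_pos h]
    simp only [show PySem.Int.floordiv (lo + hi) 2 = (lo + hi) / 2 from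
      PySem.Int.floordiv_eq_ediv_of_pos (by norm_num)]
    rw [hm] at hfl ih
    rw [if_pos hfl]
    refine ih (by omega) (by omega) hhi ?_
    intro m hm3 hmlt
    by_cases hc : m < lo
    · exact hinv m hm3 hc
    · have hmm : m ≤ (lo + hi) / 2 := by omega
      rcases lt_or_eq_of_le hmm with h' | h'
      · have hmono : Nat.fib m.toNat ≤ Nat.fib ((lo + hi) / 2).toNat := Nat.fib_mono (by omega)
        rw [pvFib_eq] at *
        omega
      · rw [h']; exact hfl
  | case2 lo hi h mid hfl ih =>
    intro h3 hle hhi hinv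
    have hm : mid = (lo + hi) / 2 := PySem.Int.floordiv_eq_ediv_of_pos (by norm_num)
    rw [pvBis, dif_pos h]
    simp only [show PySem.Int.floordiv (lo + hi) 2 = (lo + hi) / 2 from
      PySem.Int.floordiv_eq_ediv_of_pos (by norm_num)]
    rw [hm] at hfl ih
    rw [if_neg hfl]
    obtain ⟨i1, i2, i3, i4⟩ := ih h3 (by omega) (by omega) hinv
    exact ⟨i1, by omega, i3, i4⟩
  | case3 lo hi h =>
    intro h3 hle hhi hinv
    rw [pvBis, dif_neg h]
    have : lo = hi := by omega
    exact ⟨h3, by omega, by rw [this]; exact hhi, hinv⟩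

-- characterization of B for a ≥ 2: returns n+1 when fib n = a (n ≥ 3), else -1
lemma alt_mem (a : Int) (ha : 2 ≤ a) (n : Nat) (hn3 : 3 ≤ n)
    (hfib : (Nat.fib n : Int) = a) : if_fibonacci_num_alt a = n + 1 := by
  have hrw : if_fibonacci_num_alt a
      = (if pvFib (pvBis a 3 (pvGrow a a.toNat 4)) = a
          then pvBis a 3 (pvGrow a a.toNat 4) + 1 else -1) := by
    unfold if_fibonacci_num_alt
    rw [if_neg (by omega : ¬ a ≤ 1)]
  rw [hrw]
  obtain ⟨hg4, hga⟩ := grow_ok a a.toNat 4 (by norm_num) (by omega)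
  obtain ⟨hb3, _, hba, hbinv⟩ := bis_ok a 3 _ (by norm_num) (by omega) hga
    (by intro m h1 h2; omega)
  set r := pvBis a 3 (pvGrow a a.toNat 4) with hr
  have hrn : r = (n : Int) := by
    by_contra hne
    rcases lt_or_gt_of_ne hne with h' | h'
    · -- r < n : fib r ≤ fib n = a and a ≤ fib r so fib r = a; strict mono forbids r < n
      have hmono : Nat.fib r.toNat < Nat.fib n := fib_strict r.toNat n (by omega) (by omega)
      rw [pvFib_eq] at hba
      omega
    · have := hbinv n (by omega) (by omega)
      rw [pvFib_eq] at this
      simp only [Int.toNat_natCast] at this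
      omega
  rw [hrn] at hba ⊢
  rw [pvFib_eq] at hba ⊢
  simp only [Int.toNat_natCast] at hba ⊢
  rw [if_pos (by omega)]

lemma alt_none (a : Int) (ha : 2 ≤ a)
    (hno : ∀ n : Nat, 3 ≤ n → (Nat.fib n : Int) ≠ a) : if_fibonacci_num_alt a = -1 := by
  have hrw : if_fibonacci_num_alt a
      = (if pvFib (pvBis a 3 (pvGrow a a.toNat 4)) = a
          then pvBis a 3 (pvGrow a a.toNat 4) + 1 else -1) := by
    unfold if_fibonacci_num_alt
    rw [if_neg (by omega : ¬ a ≤ 1)]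
  rw [hrw]
  obtain ⟨hg4, hga⟩ := grow_ok a a.toNat 4 (by norm_num) (by omega)
  obtain ⟨hb3, _, hba, _⟩ := bis_ok a 3 _ (by norm_num) (by omega) hga
    (by intro m h1 h2; omega)
  set r := pvBis a 3 (pvGrow a a.toNat 4) with hr
  have : pvFib r ≠ a := by
    rw [pvFib_eq]
    exact hno r.toNat (by omega)
  rw [if_neg this]

-- characterization of A: its loop from state (fib k, fib (k+1), k+3)
lemma loopA_mem (a : Int) (n : Nat) (_hn3 : 3 ≤ n) (hfib : (Nat.fib n : Int) = a) :
    ∀ (fuel k : Nat), 1 ≤ k → k + 2 ≤ n → n ≤ fuel + k + 1 →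
    pvLoopA a fuel (Nat.fib k) (Nat.fib (k + 1)) ((k : Int) + 3) = n + 1 := by
  intro fuel
  induction fuel with
  | zero => intro k _ h1 h2; omega
  | succ f ih =>
    intro k hk1 hkn hfuel
    rw [pvLoopA]
    have hnew : (Nat.fib k : Int) + (Nat.fib (k + 1)) = (Nat.fib (k + 2) : Int) := by
      rw [Nat.fib_add_two]; push_cast; ring
    simp only [hnew]
    by_cases heq : k + 2 = n
    · rw [if_pos (by rw [heq]; exact hfib)]
      omega
    · have hlt : k + 2 < n := by omega
      have hfl : Nat.fib (k + 2) < Nat.fib n := fib_strict (k + 2) n (by omega) hlt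
      have hne : (Nat.fib (k + 2) : Int) ≠ a := by omega
      have hngt : ¬ a < (Nat.fib (k + 2) : Int) := by omega
      rw [if_neg hne, if_neg hngt]
      have := ih (k + 1) (by omega) (by omega) (by omega)
      have harith : ((k : Int) + 3) + 1 = ((k + 1 : Nat) : Int) + 3 := by push_cast; ring
      rw [harith]
      exact this

lemma loopA_none (a : Int) (_ha : 2 ≤ a)
    (hno : ∀ n : Nat, 3 ≤ n → (Nat.fib n : Int) ≠ a) :
    ∀ (fuel k : Nat), 1 ≤ k → a ≤ fuel + k + 1 →
    pvLoopA a fuel (Nat.fib k) (Nat.fib (k + 1)) ((k : Int) + 3) = -1 := by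
  intro fuel
  induction fuel with
  | zero => intro k _ _; rfl
  | succ f ih =>
    intro k hk1 hfuel
    rw [pvLoopA]
    have hnew : (Nat.fib k : Int) + (Nat.fib (k + 1)) = (Nat.fib (k + 2) : Int) := by
      rw [Nat.fib_add_two]; push_cast; ring
    simp only [hnew]
    have hne : (Nat.fib (k + 2) : Int) ≠ a := hno (k + 2) (by omega)
    rw [if_neg hne]
    by_cases hgt : a < (Nat.fib (k + 2) : Int)
    · rw [if_pos hgt]
    · rw [if_neg hgt]
      have harith : ((k : Int) + 3) + 1 = ((k + 1 : Nat) : Int) + 3 := by push_cast; ring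
      rw [harith]
      exact ih (k + 1) (by omega) (by omega)

-- ===== VERDICT (by name: the statement is the Claim_ definition above) =====
theorem if_fibonacci_num_spec : Claim_equal_if_fibonacci_num := by
  intro a _
  unfold Spec_if_fibonacci_num
  by_cases h1 : a ≤ 1
  · unfold if_fibonacci_num if_fibonacci_num_alt
    rw [if_pos h1, if_pos h1]
  · have ha : 2 ≤ a := by omega
    by_cases hex : ∃ n : Nat, 3 ≤ n ∧ (Nat.fib n : Int) = a
    · obtain ⟨n, hn3, hfib⟩ := hex
      have hA : if_fibonacci_num a = n + 1 := by
        unfold if_fibonacci_num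
        rw [if_neg h1]
        have hnle : n ≤ a.toNat + 1 := by
          have := fib_lb' n (by omega)
          omega
        have := loopA_mem a n hn3 hfib a.toNat 1 (by norm_num) (by omega) (by omega)
        simpa using this
      rw [hA, alt_mem a ha n hn3 hfib]
    · have hex' : ∀ n : Nat, 3 ≤ n → (Nat.fib n : Int) ≠ a := fun n hn hf => hex ⟨n, hn, hf⟩
      have hA : if_fibonacci_num a = -1 := by
        unfold if_fibonacci_num
        rw [if_neg h1]
        have := loopA_none a ha hex' a.toNat 1 (by norm_num) (by omega)
        simpa using this
      rw [hA, alt_none a ha hex']
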